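-- pv_equiv track=rewrite | github.com/ayub404/Week6 | practice1.py | summarize_sensor_data
-- ===== SOURCE A (Python) =====
-- def summarize_sensor_data(reading):
--     if not reading:
--         return []
--     reading.sort()
--     sorted_list = []
--     current_id = reading[0][0]
--
--     for i in range( 1,len(reading)):
--         if reading[i][0] != current_id:
--             sorted_list.append(reading[i-1])
--             current_id = reading[i][0]
--     sorted_list.append(reading[-1])
--     return sorted_list
-- ===== SOURCE B (Python) =====
-- def summarize_sensor_data(reading):
--     # B does NOT sort `reading` in place (A does); only the return value is claimed equivalent.
--     if not reading:
--         return []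
--     best = {}
--     for t in reading:
--         if t[0] not in best or t > best[t[0]]:
--             best[t[0]] = t
--     return [best[k] for k in sorted(best)]
-- ===== Notes on version B (the rewrite author's own statement) =====
-- stated objective: alternative
-- what changed: B never sorts the readings: one unsorted pass keeps the lexicographic maximum tuple per id via an explicit comparison, then only the distinct ids are sorted to emit the output, replacing A's sort-then-adjacent-boundary scan; B also does not mutate `reading` in place (A sorts it).
import Mathlib
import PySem

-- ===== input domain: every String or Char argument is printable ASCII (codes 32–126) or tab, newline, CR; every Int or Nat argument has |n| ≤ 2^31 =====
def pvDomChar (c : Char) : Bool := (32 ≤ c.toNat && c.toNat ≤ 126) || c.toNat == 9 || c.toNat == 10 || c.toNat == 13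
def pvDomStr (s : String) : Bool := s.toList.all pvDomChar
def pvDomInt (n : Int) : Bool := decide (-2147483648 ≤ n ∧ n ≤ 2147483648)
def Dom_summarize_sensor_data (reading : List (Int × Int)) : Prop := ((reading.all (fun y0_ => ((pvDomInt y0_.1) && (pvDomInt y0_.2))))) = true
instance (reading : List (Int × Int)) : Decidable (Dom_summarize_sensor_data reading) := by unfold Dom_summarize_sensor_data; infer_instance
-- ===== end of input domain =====

-- B keeps the lexicographic maximum tuple per id in ONE unsorted pass and sorts only the
-- distinct ids, instead of A's sort-then-boundary scan; B does not sort `reading` in place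
-- (A does) — the equivalence proved here is about the RETURN value only.

-- ===== PORT A =====
def summarize_sensor_data (reading : List (Int × Int)) : List (Int × Int) :=
  if reading = [] then []
  else
    let r := PySem.List.sorted2 reading (fun t => t.1) (fun t => t.2)
    let current_id : Int := (PySem.List.pyGetD r 0 ((0 : Int), (0 : Int))).1
    let st := (PySem.List.pyRange 1 (r.length : Int) 1).foldl
      (fun (st : List (Int × Int) × Int) i =>
        if (PySem.List.pyGetD r i ((0 : Int), (0 : Int))).1 ≠ st.2 then
          (st.1 ++ [PySem.List.pyGetD r (i - 1) ((0 : Int), (0 : Int))],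
           (PySem.List.pyGetD r i ((0 : Int), (0 : Int))).1)
        else st)
      ([], current_id)
    st.1 ++ [PySem.List.pyGetD r (-1) ((0 : Int), (0 : Int))]

-- ===== PORT B =====
-- Python tuple comparison `t > u` on int pairs (lexicographic, strict)
def pvLexGt (t u : Int × Int) : Bool :=
  decide (u.1 < t.1) || (decide (t.1 = u.1) && decide (u.2 < t.2))

def summarize_sensor_data_alt (reading : List (Int × Int)) : List (Int × Int) :=
  if reading = [] then []
  else
    let best := reading.foldl
      (fun (d : PySem.Dict Int (Int × Int)) t =>
        if !(d.contains t.1) || pvLexGt t (d.getD t.1 ((0 : Int), (0 : Int))) then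
          d.insert t.1 t
        else d)
      PySem.Dict.empty
    -- best[k]: k is always a key of best, so the getD default (0,0) is never used
    (PySem.List.sorted best.keys (fun k => k) false).map
      (fun k => best.getD k ((0 : Int), (0 : Int)))

-- ===== PRECONDITION & SPEC =====
def Spec_summarize_sensor_data (reading : List (Int × Int)) (out : List (Int × Int)) : Prop := out = summarize_sensor_data_alt reading
instance (reading : List (Int × Int)) (out : List (Int × Int)) : Decidable (Spec_summarize_sensor_data reading out) := by unfold Spec_summarize_sensor_data; infer_instance

-- ===== CLAIM (what is proved, stated in full; the proofs are below) =====
def Claim_equal_summarize_sensor_data : Prop := ∀ (reading : List (Int × Int)), Dom_summarize_sensor_data reading → Spec_summarize_sensor_data reading (summarize_sensor_data reading)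

-- ===== LEMMAS AND PROOFS =====

-- lexicographic ≤ on int pairs, as a Prop
def pvLexLE (p q : Int × Int) : Prop := p.1 < q.1 ∨ (p.1 = q.1 ∧ p.2 ≤ q.2)

theorem pvLexGt_eq_false_iff (p q : Int × Int) : pvLexGt p q = false ↔ pvLexLE p q := by
  simp only [pvLexGt, pvLexLE, Bool.or_eq_false_iff, Bool.and_eq_false_iff,
    decide_eq_false_iff_not]
  constructor
  · rintro ⟨h1, h2⟩
    rcases h2 with h2 | h2 <;> omega
  · intro h
    constructor <;> [skip; by_cases hq : p.1 = q.1] <;> first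
      | (left; omega) | (right; omega) | omega
  
theorem pvLexGt_true_imp_le (p q : Int × Int) (h : pvLexGt p q = true) : pvLexLE q p := by
  simp only [pvLexGt, Bool.or_eq_true_iff, Bool.and_eq_true_iff, decide_eq_true_eq] at h
  unfold pvLexLE
  rcases h with h | ⟨h1, h2⟩
  · left; omega
  · right; omega

theorem pvLexLE_trans (p q r : Int × Int) (h1 : pvLexLE p q) (h2 : pvLexLE q r) : pvLexLE p r := by
  unfold pvLexLE at *
  rcases h1 with h1 | ⟨h1, h1'⟩ <;> rcases h2 with h2 | ⟨h2, h2'⟩ <;>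
    first | (left; omega) | (right; exact ⟨by omega, by omega⟩)

theorem pvLexLE_antisymm (p q : Int × Int) (h1 : pvLexLE p q) (h2 : pvLexLE q p) : p = q := by
  unfold pvLexLE at *
  have : p.1 = q.1 ∧ p.2 = q.2 := by
    rcases h1 with h1 | ⟨h1, h1'⟩ <;> rcases h2 with h2 | ⟨h2, h2'⟩ <;> omega
  exact Prod.ext this.1 this.2

theorem pvLexLE_refl (p : Int × Int) : pvLexLE p p := by unfold pvLexLE; right; omega

-- ---------- A side: spec `pvLpg` = last element of each run of equal ids ----------
def pvLpg (c : Int × Int) : List (Int × Int) → List (Int × Int)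
  | [] => [c]
  | t :: rest => if t.1 = c.1 then pvLpg t rest else c :: pvLpg t rest

def pvStepA (st : List (Int × Int) × Int) (p : (Int × Int) × (Int × Int)) : List (Int × Int) × Int :=
  if p.2.1 ≠ st.2 then (st.1 ++ [p.1], p.2.1) else st

theorem pvLemA (t : List (Int × Int)) : ∀ (a : Int × Int) (acc : List (Int × Int)),
    ((((a :: t).zip t).foldl pvStepA (acc, a.1)).1 ++ [(a :: t).getLast (by simp)])
      = acc ++ pvLpg a t := by
  induction t with
  | nil => intro a acc; simp [pvLpg]
  | cons b t' ih =>
    intro a acc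
    have hzip : ((a :: b :: t').zip (b :: t')) = (a, b) :: ((b :: t').zip t') := rfl
    rw [hzip, List.foldl_cons]
    by_cases h : b.1 = a.1
    · have : pvStepA (acc, a.1) (a, b) = (acc, b.1) := by simp [pvStepA, h]
      rw [this]
      have hlast : (a :: b :: t').getLast (by simp) = (b :: t').getLast (by simp) := by
        simp [List.getLast]
      rw [hlast, ih b acc]
      simp [pvLpg, h]
    · have : pvStepA (acc, a.1) (a, b) = (acc ++ [a], b.1) := by simp [pvStepA, h]
      rw [this]
      have hlast : (a :: b :: t').getLast (by simp) = (b :: t').getLast (by simp) := by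
        simp [List.getLast]
      rw [hlast, ih b (acc ++ [a])]
      simp [pvLpg, h]

theorem pvLemIdx (r : List (Int × Int)) : ∀ (u : List (Int × Int)) (k : Nat)
    (init : List (Int × Int) × Int), r.drop k = u →
    ((PySem.List.pyRange ((k : Int) + 1) (r.length : Int) 1).foldl
      (fun (st : List (Int × Int) × Int) i =>
        if (PySem.List.pyGetD r i ((0 : Int), (0 : Int))).1 ≠ st.2 then
          (st.1 ++ [PySem.List.pyGetD r (i - 1) ((0 : Int), (0 : Int))],
           (PySem.List.pyGetD r i ((0 : Int), (0 : Int))).1)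
        else st) init)
      = (u.zip u.tail).foldl pvStepA init := by
  intro u
  induction u with
  | nil =>
    intro k init hdrop
    have hlen : r.length ≤ k := by
      by_contra h
      have : r.drop k ≠ [] := by
        simp [List.drop_eq_nil_iff]; omega
      exact this hdrop
    rw [PySem.List.pyRange_one_eq_nil (by exact_mod_cast by omega)]
    simp
  | cons x u' ih =>
    intro k init hdrop
    have hk : k < r.length := by
      by_contra h
      rw [List.drop_eq_nil_iff.mpr (by omega)] at hdrop
      exact (List.cons_ne_nil x u') hdrop.symm
    have hgetk : PySem.List.pyGetD r ((k : Int)) ((0 : Int), (0 : Int)) = x := by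
      rw [PySem.List.pyGetD_natCast]
      have : r[k]? = some x := by
        have h2 : (r.drop k)[0]? = some x := by rw [hdrop]; rfl
        simpa [List.getElem?_drop] using h2
      simp [List.getD, this]
    cases u' with
    | nil =>
      have hlen : r.length = k + 1 := by
        have := List.drop_eq_nil_iff.mp (by
          have : r.drop (k + 1) = [] := by
            rw [← List.drop_drop]
            simp [hdrop]
          exact this)
        omega
      rw [PySem.List.pyRange_one_eq_nil (by exact_mod_cast by omega)]
      simp
    | cons y u'' =>
      have hdrop1 : r.drop (k + 1) = y :: u'' := by
        rw [← List.drop_drop]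
        simp [hdrop]
      have hk1 : k + 1 < r.length := by
        by_contra h
        rw [List.drop_eq_nil_iff.mpr (by omega)] at hdrop1
        exact (List.cons_ne_nil y u'') hdrop1.symm
      have hgetk1 : PySem.List.pyGetD r ((k : Int) + 1) ((0 : Int), (0 : Int)) = y := by
        have : ((k : Int) + 1) = ((k + 1 : Nat) : Int) := by push_cast; ring
        rw [this, PySem.List.pyGetD_natCast]
        have : r[k+1]? = some y := by
          have h2 : (r.drop (k+1))[0]? = some y := by rw [hdrop1]; rfl
          simpa [List.getElem?_drop] using h2
        simp [List.getD, this]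
      rw [PySem.List.pyRange_one_cons (by exact_mod_cast by omega), List.foldl_cons]
      have hstep :
          (if (PySem.List.pyGetD r ((k : Int) + 1) ((0 : Int), (0 : Int))).1 ≠ init.2 then
            (init.1 ++ [PySem.List.pyGetD r ((k : Int) + 1 - 1) ((0 : Int), (0 : Int))],
             (PySem.List.pyGetD r ((k : Int) + 1) ((0 : Int), (0 : Int))).1)
          else init) = pvStepA init (x, y) := by
        have h1 : (k : Int) + 1 - 1 = (k : Int) := by ring
        rw [h1, hgetk, hgetk1, pvStepA]
      rw [hstep]
      have hrange : (k : Int) + 1 + 1 = ((k + 1 : Nat) : Int) + 1 := by push_cast; ring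
      rw [hrange, ih (k + 1) (pvStepA init (x, y)) hdrop1]
      rfl

-- ---------- the sorted list is lexicographically nondecreasing ----------
theorem pvBeforeTrue (x y : Int × Int)
    (h : (decide (x.1 < y.1) || (!decide (y.1 < x.1) && decide (x.2 < y.2))) = true) :
    pvLexLE x y := by
  unfold pvLexLE
  rcases Bool.or_eq_true_iff.mp h with h | h
  · left; exact of_decide_eq_true h
  · have h1 := Bool.and_eq_true_iff.mp h
    have hny : ¬ (y.1 < x.1) := by
      intro hc
      have := h1.1; simp [hc] at this
    have h2 := of_decide_eq_true h1.2
    by_cases he : x.1 = y.1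
    · right; omega
    · left; omega

theorem pvBeforeFalse (x y : Int × Int)
    (h : (decide (x.1 < y.1) || (!decide (y.1 < x.1) && decide (x.2 < y.2))) = false) :
    pvLexLE y x := by
  unfold pvLexLE
  rcases Bool.or_eq_false_iff.mp h with ⟨h1, h2⟩
  have h1' := of_decide_eq_false h1
  rcases Bool.and_eq_false_iff.mp h2 with h2 | h2
  · have : y.1 < x.1 := by
      by_contra hc
      simp [hc] at h2
    left; omega
  · have h2' := of_decide_eq_false h2
    by_cases he : y.1 = x.1
    · right; omega
    · left; omega

theorem pvPwInsertBy (x : Int × Int) (l : List (Int × Int))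
    (hl : List.Pairwise pvLexLE l) :
    List.Pairwise pvLexLE
      (PySem.List.insertBy
        (fun a b : Int × Int => decide (a.1 < b.1) || (!decide (b.1 < a.1) && decide (a.2 < b.2)))
        x l) := by
  induction l with
  | nil => simp [PySem.List.insertBy]
  | cons y ys ih =>
    rw [PySem.List.insertBy]
    rcases List.pairwise_cons.mp hl with ⟨hy, hys⟩
    by_cases hb : (decide (x.1 < y.1) || (!decide (y.1 < x.1) && decide (x.2 < y.2))) = true
    · rw [if_pos hb]
      refine List.pairwise_cons.mpr ⟨?_, hl⟩
      intro z hz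
      rcases List.mem_cons.mp hz with hz | hz
      · rw [hz]; exact pvBeforeTrue x y hb
      · exact pvLexLE_trans _ _ _ (pvBeforeTrue x y hb) (hy z hz)
    · rw [if_neg hb]
      refine List.pairwise_cons.mpr ⟨?_, ih hys⟩
      intro z hz
      rcases (PySem.List.mem_insertBy _ x z ys).mp hz with hz | hz
      · rw [hz]
        exact pvBeforeFalse x y (Bool.eq_false_iff.mpr hb)
      · exact hy z hz

theorem pvPwFold (xs : List (Int × Int)) : ∀ (acc : List (Int × Int)),
    List.Pairwise pvLexLE acc →
    List.Pairwise pvLexLE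
      (xs.foldl (fun acc x => PySem.List.insertBy
        (fun a b : Int × Int => decide (a.1 < b.1) || (!decide (b.1 < a.1) && decide (a.2 < b.2)))
        x acc) acc) := by
  induction xs with
  | nil => intro acc h; simpa using h
  | cons x xs ih =>
    intro acc h
    rw [List.foldl_cons]
    exact ih _ (pvPwInsertBy x acc h)

theorem pvSorted2Pairwise (xs : List (Int × Int)) :
    List.Pairwise pvLexLE (PySem.List.sorted2 xs (fun t => t.1) (fun t => t.2)) := by
  have h := pvPwFold xs [] (by simp)
  simpa [PySem.List.sorted2] using h

-- ---------- properties of pvLpg on a lex-sorted list ----------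
theorem pvLpg_mem (t : List (Int × Int)) : ∀ (c : Int × Int), ∀ e ∈ pvLpg c t, e ∈ c :: t := by
  induction t with
  | nil => intro c e he; simpa [pvLpg] using he
  | cons b t' ih =>
    intro c e he
    rw [pvLpg] at he
    by_cases h : b.1 = c.1
    · rw [if_pos h] at he
      have := ih b e he
      simp [List.mem_cons] at this ⊢
      tauto
    · rw [if_neg h] at he
      rcases List.mem_cons.mp he with he | he
      · simp [he]
      · have := ih b e he
        simp [List.mem_cons] at this ⊢
        tauto

theorem pvLpg_id_lb (t : List (Int × Int)) : ∀ (c : Int × Int),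
    List.Pairwise pvLexLE (c :: t) → ∀ e ∈ pvLpg c t, c.1 ≤ e.1 := by
  induction t with
  | nil => intro c _ e he; simp [pvLpg] at he; simp [he]
  | cons b t' ih =>
    intro c hpw e he
    rcases List.pairwise_cons.mp hpw with ⟨hc, hpw'⟩
    have hcb : pvLexLE c b := hc b (by simp)
    rw [pvLpg] at he
    by_cases h : b.1 = c.1
    · rw [if_pos h] at he
      have := ih b hpw' e he
      omega
    · rw [if_neg h] at he
      rcases List.mem_cons.mp he with he | he
      · rw [he]
      · have := ih b hpw' e he
        unfold pvLexLE at hcb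
        omega

theorem pvLpg_ub (t : List (Int × Int)) : ∀ (c : Int × Int),
    List.Pairwise pvLexLE (c :: t) →
    ∀ e ∈ pvLpg c t, ∀ u ∈ c :: t, u.1 = e.1 → pvLexLE u e := by
  induction t with
  | nil =>
    intro c _ e he u hu _
    simp [pvLpg] at he
    simp at hu
    rw [he, hu]; exact pvLexLE_refl c
  | cons b t' ih =>
    intro c hpw e he u hu hid
    rcases List.pairwise_cons.mp hpw with ⟨hc, hpw'⟩
    have hcb : pvLexLE c b := hc b (by simp)
    rw [pvLpg] at he
    by_cases h : b.1 = c.1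
    · rw [if_pos h] at he
      rcases List.mem_cons.mp hu with hu | hu
      · -- u = c : c ≤lex b ≤lex e, using b.1 = c.1 = u.1 = e.1
        rw [hu] at hid
        have hbe : pvLexLE b e := ih b hpw' e he b (by simp) (by omega)
        subst hu
        exact pvLexLE_trans _ _ _ hcb hbe
      · exact ih b hpw' e he u hu hid
    · rw [if_neg h] at he
      rcases List.mem_cons.mp he with he | he
      · -- e = c; any u with u.1 = c.1 in c :: b :: t' must be c itself
        subst he
        rcases List.mem_cons.mp hu with hu | hu
        · rw [hu]; exact pvLexLE_refl e
        · -- u ∈ b :: t', but then e.1 < b.1 ≤ u.1, contradiction with u.1 = e.1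
          exfalso
          have hb1 : e.1 < b.1 := by unfold pvLexLE at hcb; omega
          rcases List.mem_cons.mp hu with hu | hu
          · rw [hu] at hid; omega
          · have hbu : pvLexLE b u := (List.pairwise_cons.mp hpw').1 u hu
            unfold pvLexLE at hbu
            omega
      · rcases List.mem_cons.mp hu with hu | hu
        · -- u = c but ids in pvLpg b t' are ≥ b.1 > c.1
          exfalso
          have hb1 : c.1 < b.1 := by unfold pvLexLE at hcb; omega
          have := pvLpg_id_lb t' b hpw' e he
          rw [hu] at hid
          omega
        · exact ih b hpw' e he u hu hid

theorem pvLpg_ids_lt (t : List (Int × Int)) : ∀ (c : Int × Int),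
    List.Pairwise pvLexLE (c :: t) →
    List.Pairwise (· < ·) ((pvLpg c t).map (fun e => e.1)) := by
  induction t with
  | nil => intro c _; simp [pvLpg]
  | cons b t' ih =>
    intro c hpw
    rcases List.pairwise_cons.mp hpw with ⟨hc, hpw'⟩
    have hcb : pvLexLE c b := hc b (by simp)
    rw [pvLpg]
    by_cases h : b.1 = c.1
    · rw [if_pos h]; exact ih b hpw'
    · rw [if_neg h]
      rw [List.map_cons]
      refine List.pairwise_cons.mpr ⟨?_, ih b hpw'⟩
      intro k hk
      rcases List.mem_map.mp hk with ⟨e, he, hek⟩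
      have hb1 : c.1 < b.1 := by unfold pvLexLE at hcb; omega
      have := pvLpg_id_lb t' b hpw' e he
      omega

theorem pvLpg_ids_mem (t : List (Int × Int)) : ∀ (c : Int × Int) (k : Int),
    (k ∈ (pvLpg c t).map (fun e => e.1) ↔ k ∈ (c :: t).map (fun e => e.1)) := by
  induction t with
  | nil => intro c k; simp [pvLpg]
  | cons b t' ih =>
    intro c k
    rw [pvLpg]
    by_cases h : b.1 = c.1
    · rw [if_pos h, ih b k]
      simp only [List.map_cons, List.mem_cons, h]
      tauto
    · rw [if_neg h]
      simp only [List.map_cons, List.mem_cons]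
      rw [ih b k]
      simp only [List.map_cons, List.mem_cons]

-- ---------- B side: the conditional max-fold ----------
def pvStepB (d : PySem.Dict Int (Int × Int)) (t : Int × Int) : PySem.Dict Int (Int × Int) :=
  if !(d.contains t.1) || pvLexGt t (d.getD t.1 ((0 : Int), (0 : Int))) then d.insert t.1 t else d

def pvBMaxStep (o : Option (Int × Int)) (t : Int × Int) : Option (Int × Int) :=
  match o with
  | none => some t
  | some m => if pvLexGt t m then some t else some m

def pvBMax (o : Option (Int × Int)) (l : List (Int × Int)) : Option (Int × Int) :=
  l.foldl pvBMaxStep o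

theorem pvFoldB_get? (xs : List (Int × Int)) : ∀ (d : PySem.Dict Int (Int × Int)) (k : Int),
    (xs.foldl pvStepB d).get? k = pvBMax (d.get? k) (xs.filter (fun t => decide (t.1 = k))) := by
  induction xs with
  | nil => intro d k; simp [pvBMax]
  | cons t xs ih =>
    intro d k
    rw [List.foldl_cons, ih]
    by_cases hk : t.1 = k
    · subst hk
      rw [List.filter_cons_of_pos (by simp)]
      cases hg : d.get? t.1 with
      | none =>
        have hc : d.contains t.1 = false := by
          rw [PySem.Dict.contains_eq_isSome_get?, hg]; rfl
        have hstep : pvStepB d t = d.insert t.1 t := by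
          unfold pvStepB; rw [hc]; simp
        rw [hstep, PySem.Dict.get?_insert_self]
        simp [pvBMax, pvBMaxStep]
      | some m =>
        have hc : d.contains t.1 = true := by
          rw [PySem.Dict.contains_eq_isSome_get?, hg]; rfl
        have hgd : d.getD t.1 ((0 : Int), (0 : Int)) = m :=
          PySem.Dict.getD_of_get?_eq_some d ((0 : Int), (0 : Int)) hg
        by_cases hgt : pvLexGt t m = true
        · have hstep : pvStepB d t = d.insert t.1 t := by
            unfold pvStepB; rw [hc, hgd]; simp [hgt]
          rw [hstep, PySem.Dict.get?_insert_self]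
          simp [pvBMax, pvBMaxStep, hgt]
        · have hgt' : pvLexGt t m = false := Bool.eq_false_iff.mpr hgt
          have hstep : pvStepB d t = d := by
            unfold pvStepB; rw [hc, hgd]; simp [hgt']
          rw [hstep, hg]
          simp [pvBMax, pvBMaxStep, hgt']
    · rw [List.filter_cons_of_neg (by simpa using hk)]
      have hstep : (pvStepB d t).get? k = d.get? k := by
        unfold pvStepB
        split
        · exact PySem.Dict.get?_insert_of_ne d t (fun h => hk h.symm)
        · rfl
      rw [hstep]

theorem pvBMax_eq_none_iff (l : List (Int × Int)) : ∀ (o : Option (Int × Int)),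
    (pvBMax o l = none ↔ o = none ∧ l = []) := by
  induction l with
  | nil => intro o; simp [pvBMax]
  | cons t l ih =>
    intro o
    rw [pvBMax, List.foldl_cons]
    constructor
    · intro h
      have := (ih (pvBMaxStep o t)).mp h
      exfalso
      cases o with
      | none => simp [pvBMaxStep] at this
      | some m =>
        rcases this with ⟨h1, _⟩
        unfold pvBMaxStep at h1
        by_cases hgt : pvLexGt t m = true <;> simp [hgt] at h1
    · rintro ⟨_, h⟩; exact absurd h (by simp)

theorem pvBMax_spec (l : List (Int × Int)) : ∀ (o : Option (Int × Int)) (v : Int × Int),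
    pvBMax o l = some v →
    (v ∈ l ∨ o = some v) ∧ (∀ u ∈ l, pvLexGt u v = false) ∧
      (∀ m, o = some m → pvLexGt m v = false) := by
  induction l with
  | nil =>
    intro o v h
    simp only [pvBMax, List.foldl_nil] at h
    subst h
    refine ⟨Or.inr rfl, by simp, ?_⟩
    intro m hm
    obtain rfl : v = m := Option.some_inj.mp hm
    rw [pvLexGt_eq_false_iff]
    exact pvLexLE_refl v
  | cons t l ih =>
    intro o v h
    rw [pvBMax, List.foldl_cons] at h
    obtain ⟨hmem, hub, ho⟩ := ih (pvBMaxStep o t) v h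
    have hto : pvLexGt t v = false := by
      cases o with
      | none => exact ho t rfl
      | some m =>
        unfold pvBMaxStep at ho
        by_cases hgt : pvLexGt t m = true
        · exact ho t (by simp [hgt])
        · have hmv : pvLexGt m v = false := ho m (by simp [hgt])
          rw [pvLexGt_eq_false_iff] at hmv ⊢
          have htm : pvLexLE t m := by
            rw [← pvLexGt_eq_false_iff]; exact Bool.eq_false_iff.mpr hgt
          exact pvLexLE_trans _ _ _ htm hmv
    refine ⟨?_, ?_, ?_⟩
    · rcases hmem with hm | hm
      · exact Or.inl (List.mem_cons_of_mem _ hm)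
      · cases o with
        | none =>
          have ht : t = v := by simpa [pvBMaxStep] using hm
          exact Or.inl (ht ▸ List.mem_cons_self)
        | some m =>
          by_cases hgt : pvLexGt t m = true
          · have ht : t = v := by simpa [pvBMaxStep, hgt] using hm
            exact Or.inl (ht ▸ List.mem_cons_self)
          · have ht : m = v := by simpa [pvBMaxStep, hgt] using hm
            exact Or.inr (by rw [ht])
    · intro u hu
      rcases List.mem_cons.mp hu with hu | hu
      · rw [hu]; exact hto
      · exact hub u hu
    · intro m hm
      subst hm
      by_cases hgt : pvLexGt t m = true
      · have htv : pvLexGt t v = false := ho t (by simp [pvBMaxStep, hgt])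
        rw [pvLexGt_eq_false_iff] at htv ⊢
        exact pvLexLE_trans _ _ _ (pvLexGt_true_imp_le t m hgt) htv
      · have hgt' : pvLexGt t m = false := Bool.eq_false_iff.mpr hgt
        exact ho m (by simp [pvBMaxStep, hgt'])

theorem pvBMax_eq_some_of (l : List (Int × Int)) (v : Int × Int)
    (hv : v ∈ l) (hub : ∀ u ∈ l, pvLexGt u v = false) : pvBMax none l = some v := by
  cases hw : pvBMax none l with
  | none =>
    rw [pvBMax_eq_none_iff] at hw
    rw [hw.2] at hv
    simp at hv
  | some w =>
    obtain ⟨hmem, hub', _⟩ := pvBMax_spec l none w hw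
    have hwl : w ∈ l := by
      rcases hmem with h | h
      · exact h
      · cases h
    have h1 : pvLexLE w v := by rw [← pvLexGt_eq_false_iff]; exact hub w hwl
    have h2 : pvLexLE v w := by rw [← pvLexGt_eq_false_iff]; exact hub' v hv
    rw [pvLexLE_antisymm w v h1 h2]

theorem pvFoldB_nodup_keys (xs : List (Int × Int)) : ∀ (d : PySem.Dict Int (Int × Int)),
    d.keys.Nodup → (xs.foldl pvStepB d).keys.Nodup := by
  induction xs with
  | nil => intro d h; simpa using h
  | cons t xs ih =>
    intro d h
    rw [List.foldl_cons]
    apply ih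
    unfold pvStepB
    split
    · exact PySem.Dict.nodup_keys_insert d t.1 t h
    · exact h

-- ===== VERDICT (by name: the statement is the Claim_ definition above) =====
theorem summarize_sensor_data_spec : Claim_equal_summarize_sensor_data := by
  intro reading _
  unfold Spec_summarize_sensor_data summarize_sensor_data summarize_sensor_data_alt
  by_cases hnil : reading = []
  · simp [hnil]
  · rw [if_neg hnil, if_neg hnil]
    have hperm : (PySem.List.sorted2 reading (fun t => t.1) (fun t => t.2)).Perm reading :=
      PySem.List.sorted2_perm reading (fun t => t.1) (fun t => t.2) false
    have hr : PySem.List.sorted2 reading (fun t => t.1) (fun t => t.2) ≠ [] := by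
      intro h
      have := hperm.length_eq
      rw [h] at this
      exact hnil (List.eq_nil_of_length_eq_zero this.symm)
    obtain ⟨a, t, hat⟩ := List.exists_cons_of_ne_nil hr
    have hpw : List.Pairwise pvLexLE (a :: t) := by
      have := pvSorted2Pairwise reading; rwa [hat] at this
    have hperm' : (a :: t).Perm reading := by rwa [hat] at hperm
    -- ----- A side: A reading = pvLpg a t -----
    rw [hat]
    have hidx := pvLemIdx (a :: t) (a :: t) 0
      ([], (PySem.List.pyGetD (a :: t) (0 : Int) ((0 : Int), (0 : Int))).1) (by simp)
    have h0 : PySem.List.pyGetD (a :: t) (0 : Int) ((0 : Int), (0 : Int)) = a :=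
      PySem.List.pyGetD_zero_cons a t ((0 : Int), (0 : Int))
    have hneg : PySem.List.pyGetD (a :: t) (-1 : Int) ((0 : Int), (0 : Int))
        = (a :: t).getLast (by simp) :=
      PySem.List.pyGetD_neg_one (a :: t) ((0 : Int), (0 : Int)) (by simp)
    dsimp only
    simp only [h0] at hidx
    have h01 : ((0 : Nat) : Int) + 1 = (1 : Int) := by norm_num
    rw [h01] at hidx
    have htail : (a :: t).tail = t := rfl
    rw [h0, hidx, htail, hneg, pvLemA t a []]
    rw [List.nil_append]
    -- ----- B side -----
    have hstep : (fun (d : PySem.Dict Int (Int × Int)) t =>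
        if !(d.contains t.1) || pvLexGt t (d.getD t.1 ((0 : Int), (0 : Int))) then
          d.insert t.1 t
        else d) = pvStepB := by
      funext d t; rfl
    rw [hstep]
    set D := reading.foldl pvStepB PySem.Dict.empty with hD
    have hget : ∀ k, D.get? k = pvBMax none (reading.filter (fun t => decide (t.1 = k))) := by
      intro k
      rw [hD, pvFoldB_get? reading PySem.Dict.empty k, PySem.Dict.get?_empty]
    have hnodup : D.keys.Nodup := by
      rw [hD]
      exact pvFoldB_nodup_keys reading PySem.Dict.empty (by simp [PySem.Dict.keys_empty])
    -- membership in keys = having some tuple with that id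
    have hkeysmem : ∀ k, k ∈ D.keys ↔ k ∈ (pvLpg a t).map (fun e => e.1) := by
      intro k
      rw [pvLpg_ids_mem t a k]
      constructor
      · intro hk
        have : D.get? k ≠ none := by
          intro hc
          exact (PySem.Dict.get?_eq_none_iff_not_mem_keys D k).mp hc hk
        rw [hget k] at this
        have hne : reading.filter (fun t => decide (t.1 = k)) ≠ [] := by
          intro hc
          exact this ((pvBMax_eq_none_iff _ none).mpr ⟨rfl, hc⟩)
        obtain ⟨u, hu⟩ := List.exists_mem_of_ne_nil _ hne
        have hu' := List.mem_filter.mp hu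
        have huk : u.1 = k := by simpa using hu'.2
        have : u ∈ a :: t := hperm'.mem_iff.mpr hu'.1
        exact List.mem_map.mpr ⟨u, this, huk⟩
      · intro hk
        obtain ⟨u, hu, huk⟩ := List.mem_map.mp hk
        have hur : u ∈ reading := hperm'.mem_iff.mp hu
        have hufil : u ∈ reading.filter (fun t => decide (t.1 = k)) :=
          List.mem_filter.mpr ⟨hur, by simpa using huk⟩
        have : D.get? k ≠ none := by
          rw [hget k]
          intro hc
          rw [pvBMax_eq_none_iff] at hc
          rw [hc.2] at hufil
          simp at hufil
        by_contra hc
        exact this ((PySem.Dict.get?_eq_none_iff_not_mem_keys D k).mpr hc)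
    have hidslt : List.Pairwise (· < ·) ((pvLpg a t).map (fun e => e.1)) :=
      pvLpg_ids_lt t a hpw
    have hidsnodup : ((pvLpg a t).map (fun e => e.1)).Nodup :=
      hidslt.nodup
    have hpermkeys : ((pvLpg a t).map (fun e => e.1)).Perm D.keys := by
      rw [List.perm_ext_iff_of_nodup hidsnodup hnodup]
      intro k
      exact (hkeysmem k).symm
    have hsortedkeys : PySem.List.sorted D.keys (fun k => k) false
        = (pvLpg a t).map (fun e => e.1) :=
      PySem.List.sorted_eq_of_perm_of_pairwise_lt _ _ _ hpermkeys hidslt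
    rw [hsortedkeys, List.map_map]
    -- pointwise: for e in pvLpg a t, D.getD e.1 (0,0) = e
    have hpoint : ∀ e ∈ pvLpg a t, D.getD e.1 ((0 : Int), (0 : Int)) = e := by
      intro e he
      have her : e ∈ a :: t := pvLpg_mem t a e he
      have hefil : e ∈ reading.filter (fun u => decide (u.1 = e.1)) :=
        List.mem_filter.mpr ⟨hperm'.mem_iff.mp her, by simp⟩
      have hub : ∀ u ∈ reading.filter (fun u => decide (u.1 = e.1)), pvLexGt u e = false := by
        intro u hu
        have hu' := List.mem_filter.mp hu
        have hus : u ∈ a :: t := hperm'.mem_iff.mpr hu'.1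
        rw [pvLexGt_eq_false_iff]
        exact pvLpg_ub t a hpw e he u hus (by simpa using hu'.2)
      have : D.get? e.1 = some e := by
        rw [hget e.1]
        exact pvBMax_eq_some_of _ e hefil hub
      exact PySem.Dict.getD_of_get?_eq_some _ ((0 : Int), (0 : Int)) this
    calc pvLpg a t = (pvLpg a t).map (fun e => e) := by rw [List.map_id']
      _ = (pvLpg a t).map ((fun k => D.getD k ((0 : Int), (0 : Int))) ∘ fun e => e.1) := by
          apply List.map_congr_left
          intro e he
          exact (hpoint e he).symm
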